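-- pv_equiv track=rewrite | github.com/iptkachev/algorithms_methods_part1 | dynamic_programming/greatest_subsequences.py | gns_nlog
-- ===== SOURCE A (Python) =====
-- from typing import List, Tuple
-- from numbers import Number
--
-- def gns_nlog(array: List[int]) -> Tuple[int, List[int]]:
--     """
--     Длина и индексы наибольшей невозрастающей подпоследовательности O(nlog(n))
--     по алгоритму https://www.youtube.com/watch?v=6NwNzEK1JNY
--     :param array: List[int]
--     :return: tuple(int, List[int])
--     """
--     def binary_search(array: List[Number], key_elem: int, start_i: int = 0, end_i: int = len(array) - 1) -> int:
--         average_i = (start_i + end_i) // 2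
--         while start_i < end_i:
--             current = array[average_i]
--             next = array[average_i + 1]
--             if current >= key_elem > next:
--                 break
--             elif key_elem <= current:
--                 start_i = average_i + 1
--             elif key_elem > current:
--                 end_i = average_i - 1
--             average_i = (start_i + end_i) // 2
--         return average_i
--
--     last_elem_subseqs = [float('-inf') for _ in range(len(array) + 1)]
--     last_elem_subseqs[0] = float('inf')
--     last_elem_subseqs_indexes = [-1 for _ in range(len(array) + 1)]
--     last_elem_subseqs_prev = [-1 for _ in range(len(array) + 1)]
--
--     for i in range(len(array)):
--         j = binary_search(last_elem_subseqs, array[i]) + 1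
--         if last_elem_subseqs[j - 1] >= array[i] > last_elem_subseqs[j]:
--             last_elem_subseqs[j] = array[i]
--             last_elem_subseqs_indexes[j] = i
--             last_elem_subseqs_prev[i] = last_elem_subseqs_indexes[j - 1]
--
--     # find last element most subseq
--     last_elem_most_subseq = 0
--     for i, index in enumerate(last_elem_subseqs_indexes[::-1]):
--         if index > -1:
--             last_elem_most_subseq = index
--             length_most_subseq = len(array) - i
--             break
--
--     # recovery most subseq
--     prev_index_most_subseq = last_elem_most_subseq
--     most_subseq_indexes = []
--     while prev_index_most_subseq != -1:
--         most_subseq_indexes.append(prev_index_most_subseq + 1)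
--         prev_index_most_subseq = last_elem_subseqs_prev[prev_index_most_subseq]
--
--     return length_most_subseq, most_subseq_indexes[::-1]
-- ===== SOURCE B (Python) =====
-- from typing import List, Tuple
--
--
-- def gns_nlog(array: List[int]) -> Tuple[int, List[int]]:
--     """
--     Length and 1-based indices of the longest non-increasing subsequence,
--     by the classic O(n^2) dynamic programme: dp[i] = best length ending at i,
--     parent[i] = predecessor index (ties broken towards the latest index,
--     and the latest endpoint of maximal dp is chosen).
--     """
--     n = len(array)
--     if n == 0:
--         return 0, []
--     dp, parent = [], []
--     for i in range(n):
--         best, arg = 0, -1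
--         for j in range(i):
--             if array[j] >= array[i] and dp[j] >= best:
--                 best, arg = dp[j], j
--         dp.append(best + 1)
--         parent.append(arg)
--     end = 0
--     for i in range(n):
--         if dp[i] >= dp[end]:
--             end = i
--     idxs = []
--     k = end
--     while k != -1:
--         idxs.append(k + 1)
--         k = parent[k]
--     return dp[end], idxs[::-1]
-- ===== Notes on version B (the rewrite author's own statement) =====
-- stated objective: simpler
-- what changed: Replaced the patience-style tails array with hand-written binary search and +/-inf sentinels by the classic O(n^2) DP (dp[i]/parent[i] with latest-index tie-breaking), which reproduces A's exact index choice.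
import Mathlib
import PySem

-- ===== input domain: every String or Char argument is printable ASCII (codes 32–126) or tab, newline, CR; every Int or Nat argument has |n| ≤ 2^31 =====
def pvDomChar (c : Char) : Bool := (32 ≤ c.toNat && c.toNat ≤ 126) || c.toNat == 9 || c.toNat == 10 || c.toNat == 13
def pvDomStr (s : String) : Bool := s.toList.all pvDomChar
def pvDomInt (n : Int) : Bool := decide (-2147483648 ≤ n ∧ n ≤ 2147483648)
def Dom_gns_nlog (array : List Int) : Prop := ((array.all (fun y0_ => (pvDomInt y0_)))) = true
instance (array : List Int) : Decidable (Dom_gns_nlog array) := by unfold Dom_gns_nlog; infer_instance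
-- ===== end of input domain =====

-- Port A (patience tails + hand-written binary search) vs B: the classic O(n^2)
-- longest non-increasing subsequence DP (latest-index tie-breaking) — simpler code, same result.


-- ===== PORT A =====
-- Python's float('-inf') / float('inf') sentinels mixed with ints: an extended-integer type
-- with Python's comparison order (exact, since only ±inf and ints ever occur).
inductive pvEInt : Type where
  | bot : pvEInt
  | fin : Int → pvEInt
  | top : pvEInt
deriving DecidableEq, Repr

def pvEInt.leb : pvEInt → pvEInt → Bool
  | .bot, _ => true
  | _, .top => true
  | .top, _ => false
  | _, .bot => false
  | .fin x, .fin y => decide (x ≤ y)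

-- Python's 'a > b' on these values
def pvEInt.ltb (a b : pvEInt) : Bool := !(pvEInt.leb b a)

-- the inner 'while start_i < end_i' loop of A's binary_search (terminates: the interval shrinks)
def aBS (tails : List pvEInt) (key : Int) (s e : Int) : Int :=
  let avg := PySem.Int.floordiv (s + e) 2
  if h : s < e then
    let current := PySem.List.pyGetD tails avg .bot
    let next := PySem.List.pyGetD tails (avg + 1) .bot
    if pvEInt.leb (.fin key) current && pvEInt.ltb next (.fin key) then avg
    else if pvEInt.leb (.fin key) current then aBS tails key (avg + 1) e
    else aBS tails key s (avg - 1)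
  else avg
termination_by (e - s).toNat
decreasing_by
  · have hb := PySem.Int.floordiv_two_mid_bounds (lo := s) (hi := e) (le_of_lt h)
    omega
  · have hb := PySem.Int.floordiv_two_mid_bounds (lo := s) (hi := e) (le_of_lt h)
    omega

-- one iteration of A's main 'for i in range(len(array))' loop; the list writes
-- tails[j] = …, idxs[j] = i, prev[i] = … use List.set at j.toNat (j is provably in [1, n],
-- i in [0, n-1], so this is exactly Python's in-range list assignment).
def aStep (array : List Int) (st : List pvEInt × List Int × List Int) (i : Nat) :
    List pvEInt × List Int × List Int :=
  let (tails, idxs, prev) := st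
  let key := array.getD i 0
  let j := aBS tails key 0 ((array.length : Int) - 1) + 1
  if pvEInt.leb (.fin key) (PySem.List.pyGetD tails (j - 1) .bot)
      && pvEInt.ltb (PySem.List.pyGetD tails j .bot) (.fin key) then
    (tails.set j.toNat (.fin key), idxs.set j.toNat (i : Int),
     prev.set i (PySem.List.pyGetD idxs (j - 1) (-1)))
  else (tails, idxs, prev)

def aLoop (array : List Int) (i : Nat) : List pvEInt × List Int × List Int :=
  (List.range i).foldl (aStep array)
    ((List.replicate (array.length + 1) pvEInt.bot).set 0 .top,
     List.replicate (array.length + 1) (-1 : Int),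
     List.replicate (array.length + 1) (-1 : Int))

-- 'for i, index in enumerate(last_elem_subseqs_indexes[::-1]): if index > -1: …; break'
-- returns (last_elem_most_subseq, length_most_subseq); the [] case never occurs under Pre_
-- (Python would leave length_most_subseq unbound and raise).
def aFind (n : Int) : List Int → Int → Int × Int
  | [], _ => (0, 0)
  | x :: rest, i => if x > -1 then (x, n - i) else aFind n rest (i + 1)

-- 'while prev_index_most_subseq != -1: …' (append order; reversed by the caller);
-- fuel = length of the prev list, enough for the strictly decreasing index chain.
def aRebuild (prev : List Int) : Nat → Int → List Int
  | 0, _ => []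
  | fuel + 1, k =>
    if k = -1 then [] else (k + 1) :: aRebuild prev fuel (PySem.List.pyGetD prev k (-1))

def gns_nlog (array : List Int) : Int × List Int :=
  let st := aLoop array array.length
  let f := aFind (array.length : Int) st.2.1.reverse 0
  (f.2, (aRebuild st.2.2 st.2.2.length f.1).reverse)

-- ===== PORT B =====
-- inner scan: best, arg = 0, -1; for j in range(i): if array[j] >= array[i] and dp[j] >= best: …
def altScan (array : List Int) (dp : List Int) (i : Nat) : Int × Int :=
  (List.range i).foldl
    (fun ba j =>
      if array.getD j 0 ≥ array.getD i 0 ∧ dp.getD j 0 ≥ ba.1 then (dp.getD j 0, (j : Int))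
      else ba)
    (0, -1)

-- dp.append(best + 1); parent.append(arg)
def altStep (array : List Int) (st : List Int × List Int) (i : Nat) : List Int × List Int :=
  let ba := altScan array st.1 i
  (st.1 ++ [ba.1 + 1], st.2 ++ [ba.2])

def altDP (array : List Int) (i : Nat) : List Int × List Int :=
  (List.range i).foldl (altStep array) ([], [])

-- end = 0; for i in range(n): if dp[i] >= dp[end]: end = i
def altEnd (dp : List Int) (n : Nat) : Nat :=
  (List.range n).foldl (fun e i => if dp.getD i 0 ≥ dp.getD e 0 then i else e) 0

-- B's reconstruction 'while k != -1: …' loop is literally A's; it ports to the same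
-- helper aRebuild (fuel = length of the parent list, enough: the chain decreases).
def gns_nlog_alt (array : List Int) : Int × List Int :=
  if array.length = 0 then (0, [])
  else
    let st := altDP array array.length
    let e := altEnd st.1 array.length
    (st.1.getD e 0, (aRebuild st.2 st.2.length (e : Int)).reverse)

-- ===== PRECONDITION & SPEC =====
-- Pre_ excludes only the empty list, on which A raises UnboundLocalError.
def Pre_gns_nlog (array : List Int) : Prop := array ≠ []
instance (array : List Int) : Decidable (Pre_gns_nlog array) := by unfold Pre_gns_nlog; infer_instance
def pvWitness_gns_nlog : List Int := [3, 1, 2]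

def Spec_gns_nlog (array : List Int) (out : Int × List Int) : Prop := out = gns_nlog_alt array
instance (array : List Int) (out : Int × List Int) : Decidable (Spec_gns_nlog array out) := by
  unfold Spec_gns_nlog; infer_instance

-- ===== CLAIM (what is proved, stated in full; the proofs are below) =====
def Claim_equal_gns_nlog : Prop :=
  ∀ (array : List Int), Dom_gns_nlog array → Pre_gns_nlog array →
    Spec_gns_nlog array (gns_nlog array)

-- ===== LEMMAS AND PROOFS =====

-- ---------- pvEInt order facts ----------
theorem pvEInt.leb_refl (x : pvEInt) : pvEInt.leb x x = true := by
  cases x <;> simp [pvEInt.leb]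

theorem pvEInt.leb_trans {x y z : pvEInt} (h1 : pvEInt.leb x y = true)
    (h2 : pvEInt.leb y z = true) : pvEInt.leb x z = true := by
  cases x <;> cases y <;> cases z <;> (simp_all [pvEInt.leb]; try omega)

theorem pvEInt.leb_top (x : pvEInt) : pvEInt.leb x .top = true := by
  cases x <;> simp [pvEInt.leb]

theorem pvEInt.absurd_lt_le {x y : pvEInt} (h1 : pvEInt.ltb x y = true)
    (h2 : pvEInt.leb y x = true) : False := by
  simp [pvEInt.ltb, h2] at h1

-- ---------- B-side: dp / parent values ----------
def pvValid (a : List Int) (i j : Nat) : Prop := a.getD j 0 ≥ a.getD i 0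

def pvDp (a : List Int) (q : Nat) : Int := ((altDP a (q+1)).1).getD q 0
def pvPa (a : List Int) (q : Nat) : Int := ((altDP a (q+1)).2).getD q (-1)

theorem pvGetD_append_len {α : Type} (l : List α) (x d : α) (m : Nat) (h : l.length = m) :
    (l ++ [x]).getD m d = x := by
  subst h; simp [List.getD_eq_getElem?_getD]

theorem altDP_succ (a : List Int) (i : Nat) :
    altDP a (i+1) = altStep a (altDP a i) i := by
  simp [altDP, List.range_succ]

theorem altDP_len (a : List Int) (i : Nat) :
    (altDP a i).1.length = i ∧ (altDP a i).2.length = i := by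
  induction i with
  | zero => simp [altDP]
  | succ i ih => rw [altDP_succ]; simp [altStep, ih.1, ih.2]

theorem altDP_getD_dp (a : List Int) {q i : Nat} (h : q < i) :
    (altDP a i).1.getD q 0 = pvDp a q := by
  induction i with
  | zero => omega
  | succ i ih =>
    rcases Nat.lt_or_ge q i with hq | hq
    · rw [altDP_succ]
      simp only [altStep]
      rw [List.getD_append _ _ _ _ (by rw [(altDP_len a i).1]; omega)]
      exact ih hq
    · have : q = i := by omega
      subst this; rfl

theorem altDP_getD_pa (a : List Int) {q i : Nat} (h : q < i) :
    (altDP a i).2.getD q (-1) = pvPa a q := by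
  induction i with
  | zero => omega
  | succ i ih =>
    rcases Nat.lt_or_ge q i with hq | hq
    · rw [altDP_succ]
      simp only [altStep]
      rw [List.getD_append _ _ _ _ (by rw [(altDP_len a i).2]; omega)]
      exact ih hq
    · have hqi : q = i := by omega
      subst hqi
      simp only [pvPa]

theorem pvDp_eq (a : List Int) (i : Nat) :
    pvDp a i = (altScan a (altDP a i).1 i).1 + 1 := by
  simp only [pvDp]
  rw [altDP_succ]
  simp only [altStep]
  rw [pvGetD_append_len _ _ _ _ (altDP_len a i).1]

theorem pvPa_eq (a : List Int) (i : Nat) :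
    pvPa a i = (altScan a (altDP a i).1 i).2 := by
  simp only [pvPa]
  rw [altDP_succ]
  simp only [altStep]
  rw [pvGetD_append_len _ _ _ _ (altDP_len a i).2]

-- the inner scan: characterisation of (best, arg)
theorem altScan_fst_nonneg (a : List Int) (dp : List Int) (i : Nat) :
    0 ≤ (altScan a dp i).1 := by
  simp only [altScan]
  suffices h : ∀ m, 0 ≤ ((List.range m).foldl
      (fun ba j =>
        if a.getD j 0 ≥ a.getD i 0 ∧ dp.getD j 0 ≥ ba.1
        then (dp.getD j 0, (j : Int)) else ba) ((0 : Int), (-1 : Int))).1 from h i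
  intro m
  induction m with
  | zero => simp
  | succ m ih =>
    rw [List.range_succ, List.foldl_append]
    simp only [List.foldl_cons, List.foldl_nil]
    split
    · next hcond => omega
    · exact ih

theorem altScan_aux (a : List Int) (i : Nat) : ∀ m, m ≤ i →
    0 ≤ ((List.range m).foldl
      (fun ba j =>
        if a.getD j 0 ≥ a.getD i 0 ∧ (altDP a i).1.getD j 0 ≥ ba.1
        then ((altDP a i).1.getD j 0, (j : Int)) else ba) ((0 : Int), (-1 : Int))).1 ∧
    (∀ j, j < m → pvValid a i j → pvDp a j ≤ ((List.range m).foldl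
      (fun ba j =>
        if a.getD j 0 ≥ a.getD i 0 ∧ (altDP a i).1.getD j 0 ≥ ba.1
        then ((altDP a i).1.getD j 0, (j : Int)) else ba) ((0 : Int), (-1 : Int))).1) ∧
    ((((List.range m).foldl
      (fun ba j =>
        if a.getD j 0 ≥ a.getD i 0 ∧ (altDP a i).1.getD j 0 ≥ ba.1
        then ((altDP a i).1.getD j 0, (j : Int)) else ba) ((0 : Int), (-1 : Int))).1 = 0 ∧
      ((List.range m).foldl
      (fun ba j =>
        if a.getD j 0 ≥ a.getD i 0 ∧ (altDP a i).1.getD j 0 ≥ ba.1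
        then ((altDP a i).1.getD j 0, (j : Int)) else ba) ((0 : Int), (-1 : Int))).2 = -1 ∧
      ∀ j, j < m → ¬ pvValid a i j) ∨
     (∃ j, j < m ∧ pvValid a i j ∧ pvDp a j = ((List.range m).foldl
      (fun ba j =>
        if a.getD j 0 ≥ a.getD i 0 ∧ (altDP a i).1.getD j 0 ≥ ba.1
        then ((altDP a i).1.getD j 0, (j : Int)) else ba) ((0 : Int), (-1 : Int))).1 ∧
      ((List.range m).foldl
      (fun ba j =>
        if a.getD j 0 ≥ a.getD i 0 ∧ (altDP a i).1.getD j 0 ≥ ba.1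
        then ((altDP a i).1.getD j 0, (j : Int)) else ba) ((0 : Int), (-1 : Int))).2 = (j : Int) ∧
      ∀ j', j < j' → j' < m → pvValid a i j' → pvDp a j' < ((List.range m).foldl
      (fun ba j =>
        if a.getD j 0 ≥ a.getD i 0 ∧ (altDP a i).1.getD j 0 ≥ ba.1
        then ((altDP a i).1.getD j 0, (j : Int)) else ba) ((0 : Int), (-1 : Int))).1)) := by
  intro m
  induction m with
  | zero => intro _; refine ⟨by simp, by omega, Or.inl ⟨by simp, by simp, by omega⟩⟩
  | succ m ih =>
    intro hm1
    obtain ⟨h0, hle, hcases⟩ := ih (by omega)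
    have hmi : m < i := by omega
    have hdpm : (altDP a i).1.getD m 0 = pvDp a m := altDP_getD_dp a hmi
    have hdppos : (1 : Int) ≤ pvDp a m := by
      rw [pvDp_eq]; have := altScan_fst_nonneg a (altDP a m).1 m; omega
    rw [List.range_succ, List.foldl_append]
    simp only [List.foldl_cons, List.foldl_nil]
    by_cases hcond : a.getD m 0 ≥ a.getD i 0 ∧ (altDP a i).1.getD m 0 ≥
        ((List.range m).foldl
          (fun ba j =>
            if a.getD j 0 ≥ a.getD i 0 ∧ (altDP a i).1.getD j 0 ≥ ba.1
            then ((altDP a i).1.getD j 0, (j : Int)) else ba) ((0 : Int), (-1 : Int))).1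
    · rw [if_pos hcond]
      refine ⟨by rw [hdpm] at hcond ⊢; omega, ?_, ?_⟩
      · intro j hj hv
        rcases Nat.lt_or_ge j m with hjm | hjm
        · have := hle j hjm hv
          rw [hdpm] at hcond ⊢
          omega
        · have : j = m := by omega
          subst this
          rw [hdpm]
      · right
        exact ⟨m, by omega, hcond.1, hdpm.symm, rfl, by omega⟩
    · rw [if_neg hcond]
      rcases Classical.em (pvValid a i m) with hv | hv
      · have hlt : pvDp a m < ((List.range m).foldl
            (fun ba j =>
              if a.getD j 0 ≥ a.getD i 0 ∧ (altDP a i).1.getD j 0 ≥ ba.1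
              then ((altDP a i).1.getD j 0, (j : Int)) else ba) ((0 : Int), (-1 : Int))).1 := by
          rw [← hdpm]
          by_contra hge
          exact hcond ⟨hv, by omega⟩
        refine ⟨h0, ?_, ?_⟩
        · intro j hj hvj
          rcases Nat.lt_or_ge j m with hjm | hjm
          · exact hle j hjm hvj
          · have : j = m := by omega
            subst this; omega
        · rcases hcases with ⟨hz, _, _⟩ | ⟨j, hj, hvj, hdpj, harg, hlatest⟩
          · omega
          · right
            refine ⟨j, by omega, hvj, hdpj, harg, ?_⟩
            intro j' hjj' hj' hvj'
            rcases Nat.lt_or_ge j' m with hj'm | hj'm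
            · exact hlatest j' hjj' hj'm hvj'
            · have : j' = m := by omega
              subst this; omega
      · refine ⟨h0, ?_, ?_⟩
        · intro j hj hvj
          rcases Nat.lt_or_ge j m with hjm | hjm
          · exact hle j hjm hvj
          · have : j = m := by omega
            subst this; exact absurd hvj hv
        · rcases hcases with ⟨hz, hneg, hnov⟩ | ⟨j, hj, hvj, hdpj, harg, hlatest⟩
          · left
            refine ⟨hz, hneg, ?_⟩
            intro j hjm
            rcases Nat.lt_or_ge j m with h' | h'
            · exact hnov j h'
            · have : j = m := by omega
              subst this; exact hv
          · right
            refine ⟨j, by omega, hvj, hdpj, harg, ?_⟩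
            intro j' hjj' hj' hvj'
            rcases Nat.lt_or_ge j' m with h' | h'
            · exact hlatest j' hjj' h' hvj'
            · have : j' = m := by omega
              subst this; exact absurd hvj' hv

theorem altScan_spec (a : List Int) (i : Nat) :
    0 ≤ (altScan a (altDP a i).1 i).1 ∧
    (∀ j, j < i → pvValid a i j → pvDp a j ≤ (altScan a (altDP a i).1 i).1) ∧
    (((altScan a (altDP a i).1 i).1 = 0 ∧ (altScan a (altDP a i).1 i).2 = -1 ∧
        ∀ j, j < i → ¬ pvValid a i j) ∨
      (∃ j, j < i ∧ pvValid a i j ∧ pvDp a j = (altScan a (altDP a i).1 i).1 ∧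
        (altScan a (altDP a i).1 i).2 = (j : Int) ∧
        ∀ j', j < j' → j' < i → pvValid a i j' → pvDp a j' < (altScan a (altDP a i).1 i).1)) := by
  have := altScan_aux a i i (le_refl i)
  simpa only [altScan] using this

theorem pvDp_pos (a : List Int) (q : Nat) : 1 ≤ pvDp a q := by
  rw [pvDp_eq]
  have := (altScan_spec a q).1
  omega

theorem pvDp_le (a : List Int) (q : Nat) : pvDp a q ≤ (q : Int) + 1 := by
  induction q using Nat.strong_induction_on with
  | _ q ih =>
    rw [pvDp_eq]
    rcases (altScan_spec a q).2.2 with ⟨h0, _, _⟩ | ⟨j, hj, _, hdp, _, _⟩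
    · rw [h0]; omega
    · have := ih j hj
      omega

theorem pvPa_bounds (a : List Int) (q : Nat) : -1 ≤ pvPa a q ∧ pvPa a q < (q : Int) := by
  rw [pvPa_eq]
  rcases (altScan_spec a q).2.2 with ⟨_, h0, _⟩ | ⟨j, hj, _, _, harg, _⟩
  · rw [h0]; omega
  · rw [harg]; omega

-- ---------- A-side invariant ----------
theorem aLoop_succ (a : List Int) (i : Nat) :
    aLoop a (i+1) = aStep a (aLoop a i) i := by
  simp [aLoop, List.range_succ]

structure pvInv (a : List Int) (i : Nat) : Prop where
  lt : (aLoop a i).1.length = a.length + 1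
  lx : (aLoop a i).2.1.length = a.length + 1
  lv : (aLoop a i).2.2.length = a.length + 1
  t0 : (aLoop a i).1.getD 0 .bot = .top
  x0 : (aLoop a i).2.1.getD 0 (-1) = -1
  mono : ∀ j k : Nat, j ≤ k → k ≤ a.length →
    pvEInt.leb ((aLoop a i).1.getD k .bot) ((aLoop a i).1.getD j .bot) = true
  pile : ∀ j : Nat, 1 ≤ j → j ≤ a.length →
    ((aLoop a i).2.1.getD j (-1) = -1 ∧ (aLoop a i).1.getD j .bot = .bot ∧
      ∀ q, q < i → pvDp a q ≠ (j : Int)) ∨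
    (∃ q, q < i ∧ (aLoop a i).2.1.getD j (-1) = (q : Int) ∧
      (aLoop a i).1.getD j .bot = .fin (a.getD q 0) ∧ pvDp a q = (j : Int) ∧
      ∀ q', q < q' → q' < i → pvDp a q' ≠ (j : Int))
  hle : ∀ q, q < i →
    pvEInt.leb (.fin (a.getD q 0)) ((aLoop a i).1.getD (pvDp a q).toNat .bot) = true
  prev : ∀ q, q < i → (aLoop a i).2.2.getD q (-1) = pvPa a q

theorem pvInv_tg (a : List Int) : ∀ u : Nat, u ≤ a.length →
    ((List.replicate (a.length+1) pvEInt.bot).set 0 pvEInt.top).getD u .bot =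
      if u = 0 then .top else .bot := by
  intro u hu
  rcases Nat.eq_zero_or_pos u with h | h
  · subst h
    simp [List.getD_eq_getElem?_getD]
  · rw [if_neg (by omega)]
    simp only [List.getD_eq_getElem?_getD, List.getElem?_set, List.getElem?_replicate,
      List.length_replicate]
    split_ifs <;> simp_all

theorem pvInv_zero (a : List Int) : pvInv a 0 := by
  have hz : aLoop a 0 =
      ((List.replicate (a.length + 1) pvEInt.bot).set 0 .top,
       List.replicate (a.length + 1) (-1 : Int),
       List.replicate (a.length + 1) (-1 : Int)) := by
    simp [aLoop]
  refine ⟨?_, ?_, ?_, ?_, ?_, ?_, ?_, ?_, ?_⟩ <;> rw [hz]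
  · simp
  · simp
  · simp
  · simp
  · simp [List.getD_eq_getElem?_getD]
  · intro j k hjk hk
    rw [pvInv_tg a k hk, pvInv_tg a j (le_trans hjk hk)]
    split_ifs <;> simp_all [pvEInt.leb]
  · intro j hj1 hjn
    left
    refine ⟨?_, ?_, by omega⟩
    · simp only [List.getD_eq_getElem?_getD, List.getElem?_replicate]
      split_ifs <;> simp_all
    · rw [pvInv_tg a j hjn, if_neg (by omega)]
  · intro q hq; omega
  · intro q hq; omega

-- binary-search correctness on a non-increasing tails list
theorem aBS_spec (t : List pvEInt) (key : Int) (n : Nat) (hn : 1 ≤ n)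
    (hlen : t.length = n + 1)
    (hmono : ∀ j k : Nat, j ≤ k → k ≤ n →
      pvEInt.leb (t.getD k .bot) (t.getD j .bot) = true)
    (b : Nat) (hbn : b ≤ n - 1)
    (h1 : pvEInt.leb (.fin key) (t.getD b .bot) = true)
    (h2 : pvEInt.ltb (t.getD (b+1) .bot) (.fin key) = true) :
    ∀ s e : Int, 0 ≤ s → s ≤ (b : Int) → (b : Int) ≤ e → e ≤ (n : Int) - 1 →
      aBS t key s e = (b : Int) := by
  have hchar : ∀ u : Nat, u ≤ n → (pvEInt.leb (.fin key) (t.getD u .bot) = true ↔ u ≤ b) := by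
    intro u hu
    constructor
    · intro hk
      by_contra hub
      have hm := hmono (b+1) u (by omega) hu
      exact pvEInt.absurd_lt_le h2 (pvEInt.leb_trans hk hm)
    · intro hub
      exact pvEInt.leb_trans h1 (hmono u b hub (by omega))
  have hget : ∀ u : Int, 0 ≤ u → u ≤ (n : Int) → PySem.List.pyGetD t u .bot = t.getD u.toNat .bot := by
    intro u h0 h1'
    rw [PySem.List.pyGetD_eq_getElem t .bot h0 (by rw [hlen]; omega)]
    rw [List.getD_eq_getElem _ _ (by rw [hlen]; omega)]
  suffices H : ∀ d : Nat, ∀ s e : Int, (e - s).toNat = d → 0 ≤ s → s ≤ (b : Int) →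
      (b : Int) ≤ e → e ≤ (n : Int) - 1 → aBS t key s e = (b : Int) by
    intro s e h1' h2' h3' h4'
    exact H _ s e rfl h1' h2' h3' h4'
  intro d
  induction d using Nat.strong_induction_on with
  | _ d ih =>
  intro s e hd hs hsb hbe hen
  rw [aBS]
  have hmid := PySem.Int.floordiv_two_mid_bounds (lo := s) (hi := e) (by omega)
  set avg := PySem.Int.floordiv (s + e) 2 with havg
  by_cases hse : s < e
  · rw [dif_pos hse]
    have havglt : avg < e := by
      rw [havg, PySem.Int.floordiv_lt_iff_lt_mul (by omega)]
      omega
    have hcur : PySem.List.pyGetD t avg .bot = t.getD avg.toNat .bot :=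
      hget avg (by omega) (by omega)
    have hnxt : PySem.List.pyGetD t (avg + 1) .bot = t.getD (avg.toNat + 1) .bot := by
      rw [hget (avg + 1) (by omega) (by omega)]
      congr 1
      omega
    have hcharAvg := hchar avg.toNat (by omega)
    by_cases hg2 : pvEInt.leb (.fin key) (PySem.List.pyGetD t avg .bot) = true
    · have hab : avg.toNat ≤ b := hcharAvg.mp (by rw [← hcur]; exact hg2)
      by_cases hg1 : pvEInt.ltb (PySem.List.pyGetD t (avg + 1) .bot) (.fin key) = true
      · rw [if_pos (by rw [hg2, hg1]; rfl)]
        have hnb : ¬ (avg.toNat + 1 ≤ b) := by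
          intro hle'
          have := (hchar (avg.toNat + 1) (by omega)).mpr hle'
          rw [← hnxt] at this
          exact pvEInt.absurd_lt_le hg1 this
        omega
      · rw [if_neg (by simp only [Bool.and_eq_true]; exact fun hc => hg1 hc.2)]
        rw [if_pos hg2]
        have hleb : pvEInt.leb (.fin key) (PySem.List.pyGetD t (avg + 1) .bot) = true := by
          simp [pvEInt.ltb] at hg1
          exact hg1
        have hab1 : avg.toNat + 1 ≤ b := by
          apply (hchar (avg.toNat + 1) ?_).mp
          · rw [← hnxt]; exact hleb
          · by_contra hgt
            have hnn : avg.toNat = n := by omega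
            omega
        exact ih ((e - (avg + 1)).toNat) (by omega) (avg + 1) e rfl (by omega)
          (by omega) hbe hen
    · rw [if_neg (by simp only [Bool.and_eq_true]; exact fun hc => hg2 hc.1), if_neg hg2]
      have hba : b < avg.toNat := by
        by_contra hle'
        exact hg2 (by rw [hcur]; exact hcharAvg.mpr (by omega))
      exact ih ((avg - 1 - s).toNat) (by omega) s (avg - 1) rfl hs (by omega)
        (by omega) (by omega)
  · rw [dif_neg hse]
    have hse' : s = e := by omega
    have : s = (b : Int) := by omega
    subst this
    rw [havg, ← hse']
    exact (PySem.Int.floordiv_eq_iff_of_pos (by omega)).mpr ⟨by omega, by omega⟩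

theorem pvEInt.leb_of_ltb {x y : pvEInt} (h : pvEInt.ltb x y = true) :
    pvEInt.leb x y = true := by
  cases x <;> cases y <;> (simp_all [pvEInt.leb, pvEInt.ltb]; try omega)

theorem pvEInt.fin_leb_fin {x y : Int} :
    pvEInt.leb (.fin x) (.fin y) = true ↔ x ≤ y := by
  simp [pvEInt.leb]

theorem pvGetD_set_self {α : Type} (l : List α) (κ : Nat) (v d : α) (h : κ < l.length) :
    (l.set κ v).getD κ d = v := by
  simp [List.getD_eq_getElem?_getD, h]

theorem pvGetD_set_ne {α : Type} (l : List α) (κ u : Nat) (v d : α) (h : κ ≠ u) :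
    (l.set κ v).getD u d = l.getD u d := by
  simp [List.getD_eq_getElem?_getD, h]

-- the invariant is preserved by one step of A's loop, and dp[i]/parent[i] match
theorem pvInv_step (a : List Int) (i : Nat) (hi : i < a.length) (H : pvInv a i) :
    pvInv a (i+1) := by
  rcases hst : aLoop a i with ⟨t, xv⟩
  rcases xv with ⟨x, v⟩
  have Hlt := H.lt; have Hlx := H.lx; have Hlv := H.lv
  have Ht0 := H.t0; have Hx0 := H.x0; have Hmono := H.mono
  have Hpile := H.pile; have Hhle := H.hle; have Hprev := H.prev
  rw [hst] at Hlt Hlx Hlv Ht0 Hx0 Hmono Hpile Hhle Hprev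
  simp only at Hlt Hlx Hlv Ht0 Hx0 Hmono Hpile Hhle Hprev
  set key := a.getD i 0 with hkey
  set b := (altScan a (altDP a i).1 i).1 with hbdef
  obtain ⟨hb0, hles, hcases⟩ := altScan_spec a i
  rw [← hbdef] at hb0 hles hcases
  have hDpi : pvDp a i = b + 1 := by rw [pvDp_eq, hbdef]
  have hPai : pvPa a i = (altScan a (altDP a i).1 i).2 := pvPa_eq a i
  have hble : b ≤ (i : Int) := by
    rcases hcases with ⟨hz, _, _⟩ | ⟨j, hj, _, hdpj, _, _⟩
    · omega
    · have := pvDp_le a j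
      have : (j : Int) + 1 ≤ (i : Int) := by omega
      omega
  have hbi : b.toNat ≤ a.length - 1 := by omega
  have P1 : pvEInt.leb (.fin key) (t.getD b.toNat .bot) = true := by
    rcases hcases with ⟨hz, _, _⟩ | ⟨j, hj, hv, hdpj, _, _⟩
    · rw [hz]; simp only [Int.toNat_zero]
      rw [Ht0]; exact pvEInt.leb_top _
    · have h1' := Hhle j hj
      rw [hdpj] at h1'
      exact pvEInt.leb_trans (pvEInt.fin_leb_fin.mpr hv) h1'
  have P2 : pvEInt.ltb (t.getD (b.toNat + 1) .bot) (.fin key) = true := by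
    by_contra hc
    have hc' : pvEInt.leb (.fin key) (t.getD (b.toNat + 1) .bot) = true := by
      simp [pvEInt.ltb] at hc
      exact hc
    rcases Hpile (b.toNat + 1) (by omega) (by omega) with ⟨_, htb, _⟩ | ⟨q, hq, _, htb, hdq, _⟩
    · rw [htb] at hc'
      simp [pvEInt.leb] at hc'
    · rw [htb] at hc'
      have hvq : pvValid a i q := pvEInt.fin_leb_fin.mp hc'
      have := hles q hq hvq
      omega
  have hbs : aBS t key 0 ((a.length : Int) - 1) = (b.toNat : Int) := by
    exact aBS_spec t key a.length (by omega) Hlt Hmono b.toNat hbi P1 P2 0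
      ((a.length : Int) - 1) (by omega) (by omega) (by omega) (by omega)
  have hbto : ((b.toNat : Nat) : Int) = b := by omega
  set κ := b.toNat + 1 with hκ
  have hκn : κ ≤ a.length := by omega
  have hpg1 : PySem.List.pyGetD t ((b.toNat : Int) + 1 - 1) .bot = t.getD b.toNat .bot := by
    rw [show ((b.toNat : Int) + 1 - 1) = (b.toNat : Int) by ring]
    rw [PySem.List.pyGetD_eq_getElem t .bot (by omega) (by rw [Hlt]; omega)]
    rw [List.getD_eq_getElem _ _ (by rw [Hlt]; omega)]
    congr 1
  have hpg2 : PySem.List.pyGetD t ((b.toNat : Int) + 1) .bot = t.getD κ .bot := by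
    rw [PySem.List.pyGetD_eq_getElem t .bot (by omega) (by rw [Hlt]; omega)]
    rw [List.getD_eq_getElem _ _ (by rw [Hlt]; omega)]
    congr 1
  have hpgx : PySem.List.pyGetD x ((b.toNat : Int) + 1 - 1) (-1) = x.getD b.toNat (-1) := by
    rw [show ((b.toNat : Int) + 1 - 1) = (b.toNat : Int) by ring]
    rw [PySem.List.pyGetD_eq_getElem x (-1) (by omega) (by rw [Hlx]; omega)]
    rw [List.getD_eq_getElem _ _ (by rw [Hlx]; omega)]
    congr 1
  have hstep : aLoop a (i+1) =
      (t.set κ (.fin key), x.set κ (i : Int), v.set i (x.getD b.toNat (-1))) := by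
    rw [aLoop_succ, hst]
    simp only [aStep, ← hkey, hbs, hpg1, hpg2, hpgx]
    rw [if_pos (by rw [P1, P2]; rfl)]
    have : ((b.toNat : Int) + 1).toNat = κ := by omega
    rw [this]
  refine ⟨?_, ?_, ?_, ?_, ?_, ?_, ?_, ?_, ?_⟩ <;> rw [hstep]
  · simp [Hlt]
  · simp [Hlx]
  · simp [Hlv]
  · simp only
    rw [pvGetD_set_ne _ _ _ _ _ (by omega)]
    exact Ht0
  · simp only
    rw [pvGetD_set_ne _ _ _ _ _ (by omega)]
    exact Hx0
  · intro j k hjk hk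
    simp only
    by_cases hkκ : k = κ
    · subst hkκ
      rw [pvGetD_set_self _ _ _ _ (by omega)]
      by_cases hjκ : j = κ
      · subst hjκ
        rw [pvGetD_set_self _ _ _ _ (by omega)]
        exact pvEInt.leb_refl _
      · rw [pvGetD_set_ne _ _ _ _ _ (fun h => hjκ h.symm)]
        exact pvEInt.leb_trans P1 (Hmono j b.toNat (by omega) (by omega))
    · rw [pvGetD_set_ne _ _ _ _ _ (fun h => hkκ h.symm)]
      by_cases hjκ : j = κ
      · subst hjκ
        rw [pvGetD_set_self _ _ _ _ (by omega)]
        have h1' := Hmono κ k hjk hk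
        have h2' := pvEInt.leb_of_ltb P2
        exact pvEInt.leb_trans h1' h2'
      · rw [pvGetD_set_ne _ _ _ _ _ (fun h => hjκ h.symm)]
        exact Hmono j k hjk hk
  · intro j hj1 hjn
    simp only
    by_cases hjκ : j = κ
    · subst hjκ
      right
      refine ⟨i, by omega, ?_, ?_, ?_, by omega⟩
      · rw [pvGetD_set_self _ _ _ _ (by omega)]
      · rw [pvGetD_set_self _ _ _ _ (by omega)]
      · rw [hDpi]; omega
    · have hdpne : pvDp a i ≠ (j : Int) := by
        rw [hDpi]
        intro hcon
        apply hjκ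
        omega
      rcases Hpile j hj1 hjn with ⟨hx, ht, hq⟩ | ⟨q, hq, hxq, htq, hdq, hlat⟩
      · left
        refine ⟨?_, ?_, ?_⟩
        · rw [pvGetD_set_ne _ _ _ _ _ (fun h => hjκ h.symm)]; exact hx
        · rw [pvGetD_set_ne _ _ _ _ _ (fun h => hjκ h.symm)]; exact ht
        · intro q hq'
          rcases Nat.lt_or_ge q i with h' | h'
          · exact hq q h'
          · have : q = i := by omega
            subst this; exact hdpne
      · right
        refine ⟨q, by omega, ?_, ?_, hdq, ?_⟩
        · rw [pvGetD_set_ne _ _ _ _ _ (fun h => hjκ h.symm)]; exact hxq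
        · rw [pvGetD_set_ne _ _ _ _ _ (fun h => hjκ h.symm)]; exact htq
        · intro q' hqq' hq'
          rcases Nat.lt_or_ge q' i with h' | h'
          · exact hlat q' hqq' h'
          · have : q' = i := by omega
            subst this; exact hdpne
  · intro q hq
    simp only
    rcases Nat.lt_or_ge q i with h' | h'
    · by_cases hdq : (pvDp a q).toNat = κ
      · rw [hdq, pvGetD_set_self _ _ _ _ (by omega)]
        have h1' := Hhle q h'
        rw [hdq] at h1'
        exact pvEInt.leb_trans h1' (pvEInt.leb_of_ltb P2)
      · rw [pvGetD_set_ne _ _ _ _ _ (fun h => hdq h.symm)]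
        exact Hhle q h'
    · have hqi : q = i := by omega
      rw [hqi]
      have hκ' : (pvDp a i).toNat = κ := by rw [hDpi]; omega
      rw [hκ', pvGetD_set_self _ _ _ _ (by omega)]
      exact pvEInt.leb_refl _
  · intro q hq
    simp only
    rcases Nat.lt_or_ge q i with h' | h'
    · rw [pvGetD_set_ne _ _ _ _ _ (by omega)]
      exact Hprev q h'
    · have hqi : q = i := by omega
      rw [hqi]
      rw [pvGetD_set_self _ _ _ _ (by omega)]
      rw [hPai]
      rcases hcases with ⟨hz, hg, _⟩ | ⟨j, hj, hv, hdpj, harg, hlat⟩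
      · rw [hg]
        have : b.toNat = 0 := by omega
        rw [this]
        exact Hx0
      · rw [harg]
        have hb1 : 1 ≤ b := by
          have := pvDp_pos a j
          omega
        rcases Hpile b.toNat (by omega) (by omega) with ⟨_, _, hnoq⟩ | ⟨qL, hqL, hxb, htb, hdqL, hlatL⟩
        · exact absurd (by rw [hbto]; exact hdpj) (hnoq j hj)
        · have hjqL : j ≤ qL := by
            by_contra hlt'
            exact hlatL j (by omega) hj (by rw [hbto]; exact hdpj)
          have hvqL : pvValid a i qL := by
            apply pvEInt.fin_leb_fin.mp
            rw [← htb]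
            exact P1
          have hqLj : qL ≤ j := by
            by_contra hlt'
            have := hlat qL (by omega) hqL hvqL
            rw [hbto] at hdqL
            omega
          have : qL = j := by omega
          rw [hxb, this]

theorem pvInv_all (a : List Int) (i : Nat) (hi : i ≤ a.length) : pvInv a i := by
  induction i with
  | zero => exact pvInv_zero a
  | succ i ih => exact pvInv_step a i (by omega) (ih (by omega))

-- ---------- final phase ----------
theorem altEnd_spec (a : List Int) (n : Nat) (hn : 1 ≤ n) (hna : n = a.length) :
    altEnd (altDP a n).1 n < n ∧
    (∀ q, q < n → pvDp a q ≤ pvDp a (altEnd (altDP a n).1 n)) ∧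
    (∀ q, altEnd (altDP a n).1 n < q → q < n → pvDp a q < pvDp a (altEnd (altDP a n).1 n)) := by
  subst hna
  simp only [altEnd]
  suffices h : ∀ m, 1 ≤ m → m ≤ a.length →
      ((List.range m).foldl
        (fun e i => if (altDP a a.length).1.getD i 0 ≥ (altDP a a.length).1.getD e 0 then i else e)
        0) < m ∧
      (∀ q, q < m → pvDp a q ≤ pvDp a ((List.range m).foldl
        (fun e i => if (altDP a a.length).1.getD i 0 ≥ (altDP a a.length).1.getD e 0 then i else e)
        0)) ∧
      (∀ q, ((List.range m).foldl
        (fun e i => if (altDP a a.length).1.getD i 0 ≥ (altDP a a.length).1.getD e 0 then i else e)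
        0) < q → q < m → pvDp a q < pvDp a ((List.range m).foldl
        (fun e i => if (altDP a a.length).1.getD i 0 ≥ (altDP a a.length).1.getD e 0 then i else e)
        0)) from h a.length hn (le_refl _)
  intro m
  induction m with
  | zero => omega
  | succ m ih =>
    intro _ hmn
    rcases Nat.eq_zero_or_pos m with hm0 | hm0
    · subst hm0
      simp only [List.range_succ, List.range_zero, List.nil_append, List.foldl_cons,
        List.foldl_nil]
      rw [if_pos (le_refl _)]
      exact ⟨by omega, fun q hq => by interval_cases q; exact le_refl _,
        fun q h1 h2 => by omega⟩
    · obtain ⟨he, hmax, hlast⟩ := ih hm0 (by omega)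
      rw [List.range_succ, List.foldl_append]
      simp only [List.foldl_cons, List.foldl_nil]
      set e := (List.range m).foldl
        (fun e i => if (altDP a a.length).1.getD i 0 ≥ (altDP a a.length).1.getD e 0 then i else e)
        0 with hedef
      have hgm : (altDP a a.length).1.getD m 0 = pvDp a m := altDP_getD_dp a (by omega)
      have hge' : (altDP a a.length).1.getD e 0 = pvDp a e := altDP_getD_dp a (by omega)
      by_cases hc : (altDP a a.length).1.getD m 0 ≥ (altDP a a.length).1.getD e 0
      · rw [if_pos hc]
        rw [hgm, hge'] at hc
        refine ⟨by omega, ?_, by omega⟩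
        intro q hq
        rcases Nat.lt_or_ge q m with h' | h'
        · exact le_trans (hmax q h') hc
        · have : q = m := by omega
          subst this; exact le_refl _
      · rw [if_neg hc]
        rw [hgm, hge'] at hc
        refine ⟨by omega, ?_, ?_⟩
        · intro q hq
          rcases Nat.lt_or_ge q m with h' | h'
          · exact hmax q h'
          · have : q = m := by omega
            subst this; omega
        · intro q h1 h2
          rcases Nat.lt_or_ge q m with h' | h'
          · exact hlast q h1 h'
          · have : q = m := by omega
            subst this; omega

theorem aFind_skip (n : Int) (u rest : List Int) (i0 : Int) (h : ∀ t ∈ u, ¬ t > -1) :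
    aFind n (u ++ rest) i0 = aFind n rest (i0 + u.length) := by
  induction u generalizing i0 with
  | nil => simp
  | cons x xs ih =>
    have hx := h x (by simp)
    simp only [List.cons_append, aFind, if_neg hx]
    rw [ih (i0 + 1) (fun t ht => h t (List.mem_cons_of_mem _ ht))]
    have harith : i0 + 1 + (xs.length : Int) = i0 + ((x :: xs).length : Int) := by
      simp [List.length_cons]; omega
    rw [harith]

theorem rebuild_eq (v par : List Int) (n : Nat)
    (hv : v.length = n + 1) (hp : par.length = n)
    (hagree : ∀ q : Nat, q < n → v.getD q (-1) = par.getD q (-1) ∧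
      par.getD q (-1) < (q : Int) ∧ -1 ≤ par.getD q (-1)) :
    ∀ (f1 f2 : Nat) (k : Int), -1 ≤ k → k < (f1 : Int) → k < (f2 : Int) → k < (n : Int) →
      aRebuild v f1 k = aRebuild par f2 k := by
  intro f1
  induction f1 with
  | zero =>
    intro f2 k h1 h2 _ _
    have : k = -1 := by omega
    subst this
    cases f2 <;> simp [aRebuild, aRebuild]
  | succ f ih =>
    intro f2 k h1 h2 h3 h4
    rcases eq_or_lt_of_le h1 with hk1 | hk0
    · rw [← hk1]
      cases f2 <;> simp [aRebuild, aRebuild]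
    · have hk0' : 0 ≤ k := by omega
      obtain ⟨f2', rfl⟩ : ∃ f2', f2 = f2' + 1 := ⟨f2 - 1, by omega⟩
      have hknat : k.toNat < n := by omega
      obtain ⟨hag, hlt, hge⟩ := hagree k.toNat hknat
      have hvk : PySem.List.pyGetD v k (-1) = v.getD k.toNat (-1) := by
        rw [PySem.List.pyGetD_eq_getElem v (-1) hk0' (by rw [hv]; push_cast; omega)]
        rw [List.getD_eq_getElem _ _ (by omega)]
      have hpk : PySem.List.pyGetD par k (-1) = par.getD k.toNat (-1) := by
        rw [PySem.List.pyGetD_eq_getElem par (-1) hk0' (by rw [hp]; omega)]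
        rw [List.getD_eq_getElem _ _ (by omega)]
      simp only [aRebuild, aRebuild, if_neg (by omega : ¬ k = -1)]
      rw [hvk, hpk, hag]
      congr 1
      exact ih (f2') (par.getD k.toNat (-1)) hge (by omega)
        (by omega) (by omega)

-- the assembled equivalence
theorem pv_main (a : List Int) (ha : a ≠ []) : gns_nlog a = gns_nlog_alt a := by
  have hn : 1 ≤ a.length := by
    cases a with
    | nil => exact absurd rfl ha
    | cons y ys => simp
  have H := pvInv_all a a.length (le_refl _)
  rcases hst : aLoop a a.length with ⟨t, xv⟩
  rcases xv with ⟨x, v⟩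
  have Hlx := H.lx; have Hlv := H.lv; have Hx0 := H.x0
  have Hpile := H.pile; have Hprev := H.prev
  rw [hst] at Hlx Hlv Hx0 Hpile Hprev
  simp only at Hlx Hlv Hx0 Hpile Hprev
  obtain ⟨hen, hmax, hlast⟩ := altEnd_spec a a.length hn rfl
  set e := altEnd (altDP a a.length).1 a.length with hedef
  set K := pvDp a e with hKdef
  have hK1 : 1 ≤ K := pvDp_pos a e
  have hKe : K ≤ (e : Int) + 1 := pvDp_le a e
  have hKn : K ≤ (a.length : Int) := by omega
  set κ := K.toNat with hκdef
  have hκ1 : 1 ≤ κ := by omega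
  have hκn : κ ≤ a.length := by omega
  have hKκ : ((κ : Nat) : Int) = K := by omega
  -- the pile at height K holds exactly e
  have hxκ : x.getD κ (-1) = (e : Int) := by
    rcases Hpile κ hκ1 hκn with ⟨_, _, hnoq⟩ | ⟨qL, hqL, hxκ', _, hdqL, hlatL⟩
    · exact absurd (by rw [hKκ]) (hnoq e hen)
    · have h1' : e ≤ qL := by
        by_contra hlt'
        exact hlatL e (by omega) hen (by rw [hKκ])
      have h2' : qL ≤ e := by
        by_contra hlt'
        have := hlast qL (by omega) hqL
        rw [hKκ] at hdqL
        omega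
      have : qL = e := by omega
      rw [hxκ', this]
  -- all piles above K are empty
  have hxhigh : ∀ j : Nat, κ < j → j ≤ a.length → x.getD j (-1) = -1 := by
    intro j hj1 hj2
    rcases Hpile j (by omega) hj2 with ⟨hx', _, _⟩ | ⟨q, hq, _, _, hdq, _⟩
    · exact hx'
    · have := hmax q hq
      omega
  -- the reversed scan finds (e, K)
  have hκlt : κ < x.length := by omega
  have hsplit : x = x.take κ ++ x[κ] :: x.drop (κ+1) := by
    rw [List.getElem_cons_drop, List.take_append_drop]
  have hfind : aFind (a.length : Int) x.reverse 0 = ((e : Int), (κ : Int)) := by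
    have hxe : x[κ] = (e : Int) := by
      rw [← List.getD_eq_getElem x (-1) hκlt]
      exact hxκ
    have hrev : x.reverse = (x.drop (κ+1)).reverse ++ x[κ] :: (x.take κ).reverse := by
      conv_lhs => rw [hsplit]
      simp
    rw [hrev]
    rw [aFind_skip _ _ _ _ ?hall]
    case hall =>
      intro tval htval
      rw [List.mem_reverse] at htval
      obtain ⟨m, hm, hget⟩ := List.mem_iff_getElem.mp htval
      have hmlen : κ + 1 + m < x.length := by
        have := hm
        simp [List.length_drop] at this
        omega
      rw [List.getElem_drop] at hget
      have : x.getD (κ + 1 + m) (-1) = -1 :=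
        hxhigh (κ + 1 + m) (by omega) (by omega)
      rw [List.getD_eq_getElem x (-1) hmlen] at this
      omega
    · simp only [aFind, hxe]
      rw [if_pos (by omega)]
      have hlen' : ((x.drop (κ+1)).reverse.length : Int) = (a.length : Int) - κ := by
        simp [List.length_drop]
        omega
      rw [hlen']
      have harith : (a.length : Int) - (0 + ((a.length : Int) - κ)) = (κ : Int) := by omega
      rw [harith]
  -- rebuild chains agree
  have hpar := (altDP_len a a.length).2
  have hreb : aRebuild v v.length (e : Int) =
      aRebuild (altDP a a.length).2 (altDP a a.length).2.length (e : Int) := by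
    apply rebuild_eq v (altDP a a.length).2 a.length Hlv hpar
    · intro q hq
      have h1' := Hprev q hq
      have h2' := altDP_getD_pa a (i := a.length) hq
      have h3' := pvPa_bounds a q
      constructor
      · rw [h1', h2']
      · rw [h2']
        exact ⟨h3'.2, h3'.1⟩
    · omega
    · rw [Hlv]; push_cast; omega
    · rw [hpar]; omega
    · omega
  -- assemble
  have hdpe : (altDP a a.length).1.getD e 0 = (κ : Int) := by
    rw [altDP_getD_dp a hen, ← hKdef, hKκ]
  simp only [gns_nlog, gns_nlog_alt, hst]
  rw [if_neg (by omega)]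
  simp only [hfind, hreb]
  rw [← hedef, hdpe]

-- ===== VERDICT (by name: the statement is the Claim_ definition above) =====
theorem gns_nlog_spec : Claim_equal_gns_nlog := by
  intro a _ hpre
  unfold Spec_gns_nlog
  exact pv_main a hpre
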